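-- pv_equiv track=rewrite | github.com/chris-farion/Wordle_Help | Wordle.py | is_list_sorted_by_position
-- ===== SOURCE A (Python) =====
-- def is_list_sorted_by_position(words,position=0):
--     #THIS WILL NOT PROPERLY SORT THE LIST. This simply provides bounds to eliminate words.
--     #Using logic to 'jump' 2 words so that the same word is not reloaded
--     is_Sorted = True
--     word_count = len(words)
--     if word_count <= 1:
--         return is_Sorted
--     compare_A_to_B = True
--     switch_scenario = True
--     letter_A = words[0][position]
--     letter_B = words[1][position]
--     for word_index in range(((word_count)-2)):
--         if compare_A_to_B:
--             if letter_A > letter_B: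
--                 is_Sorted = False
--                 break
--             letter_A = words[word_index+2][position]
--             compare_A_to_B = False
--         else:
--             if letter_B > letter_A:
--                 is_Sorted = False
--                 break
--             letter_B = words[word_index+2][position]
--             compare_A_to_B = True
--     #Last comparison at the list. Avoids out of range errors.
--     if compare_A_to_B:
--         if letter_A > letter_B:
--             is_Sorted = False
--     else:
--         if letter_B > letter_A:
--             is_Sorted = False
--     return is_Sorted
-- ===== SOURCE B (Python) =====
-- def is_list_sorted_by_position(words, position=0):
--     if len(words) <= 1:
--         return True
--     keys = [w[position] for w in words]
--     return keys == sorted(keys)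
-- ===== Notes on version B (the rewrite author's own statement) =====
-- stated objective: simpler
-- what changed: Replaces the alternating two-register A/B scan with break logic by extracting the position-chars once and comparing that key list with its sorted copy.
-- outside the precondition, e.g. on is_list_sorted_by_position(['b', 'a', ''], 0): A returns False, B raises IndexError
import Mathlib
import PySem

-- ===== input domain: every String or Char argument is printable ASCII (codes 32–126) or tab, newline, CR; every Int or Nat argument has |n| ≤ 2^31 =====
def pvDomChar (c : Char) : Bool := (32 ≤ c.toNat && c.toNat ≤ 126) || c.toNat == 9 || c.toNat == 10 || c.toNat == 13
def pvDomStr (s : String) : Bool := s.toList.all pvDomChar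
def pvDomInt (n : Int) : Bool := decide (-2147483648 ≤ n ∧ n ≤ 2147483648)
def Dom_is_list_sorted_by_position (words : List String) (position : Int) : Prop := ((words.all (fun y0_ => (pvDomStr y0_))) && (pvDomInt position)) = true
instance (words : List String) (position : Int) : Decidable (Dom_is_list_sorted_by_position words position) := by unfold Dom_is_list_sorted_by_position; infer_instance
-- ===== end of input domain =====

-- B replaces A's alternating two-register scan (with break) by extracting the position
-- characters once and comparing the key list with its sorted copy: simpler, not faster.

-- ===== PORT A =====
-- words[i][position]: list index i is a nonnegative in-range Nat wherever A runs without
-- raising (Pre_ below); the string index uses PySem.Str.pyGet? (Python-exact, negatives wrap),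
-- with getD ' ' only for the inputs Pre_ excludes (where Python raises IndexError).
def pvGetA (words : List String) (position : Int) (i : Nat) : Char :=
  ((words[i]?).bind (fun w => PySem.Str.pyGet? w position)).getD ' '

-- the 'for word_index in range(word_count-2)' loop of A, fuel = remaining iterations,
-- state (word_index, compare_A_to_B, letter_A, letter_B); fuel 0 = the final comparison
def aLoop (keyf : Nat → Char) : Nat → Nat → Bool → Char → Char → Bool
  | 0, _, cmpAB, lA, lB =>
      if cmpAB then (if lA > lB then false else true)
      else (if lB > lA then false else true)
  | k+1, i, cmpAB, lA, lB =>
      if cmpAB then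
        if lA > lB then false
        else aLoop keyf k (i+1) false (keyf (i+2)) lB
      else
        if lB > lA then false
        else aLoop keyf k (i+1) true lA (keyf (i+2))

def is_list_sorted_by_position (words : List String) (position : Int) : Bool :=
  if words.length ≤ 1 then true
  else aLoop (pvGetA words position) (words.length - 2) 0 true
        (pvGetA words position 0) (pvGetA words position 1)

-- ===== PORT B =====
def pvKey (position : Int) (w : String) : Char := (PySem.Str.pyGet? w position).getD ' '

def is_list_sorted_by_position_alt (words : List String) (position : Int) : Bool :=
  if words.length ≤ 1 then true
  else
    let keys := words.map (pvKey position)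
    keys == PySem.List.sorted keys (fun c => c) false

-- ===== PRECONDITION & SPEC =====
-- Pre_ excludes the inputs with ≥ 2 words where some word lacks a character at `position`:
-- there Python A raises IndexError (or, when an earlier pair already breaks the scan,
-- accidentally returns False without ever indexing the short word), while B, which extracts
-- every key, raises IndexError.
def Pre_is_list_sorted_by_position (words : List String) (position : Int) : Prop :=
  words.length ≤ 1 ∨ ∀ w ∈ words, (PySem.Str.pyGet? w position).isSome
instance (words : List String) (position : Int) : Decidable (Pre_is_list_sorted_by_position words position) := by unfold Pre_is_list_sorted_by_position; infer_instance

def pvWitness_is_list_sorted_by_position : List String × Int := (["ab", "ba"], 0)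

def Spec_is_list_sorted_by_position (words : List String) (position : Int) (out : Bool) : Prop := out = is_list_sorted_by_position_alt words position
instance (words : List String) (position : Int) (out : Bool) : Decidable (Spec_is_list_sorted_by_position words position out) := by unfold Spec_is_list_sorted_by_position; infer_instance

-- ===== CLAIM (what is proved, stated in full; the proofs are below) =====
def Claim_equal_is_list_sorted_by_position : Prop := ∀ (words : List String) (position : Int), Dom_is_list_sorted_by_position words position → Pre_is_list_sorted_by_position words position → Spec_is_list_sorted_by_position words position (is_list_sorted_by_position words position)

-- ===== LEMMAS AND PROOFS =====

lemma pvGetA_eq_getD (words : List String) (position : Int) (i : Nat) :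
    pvGetA words position i = (words.map (pvKey position)).getD i ' ' := by
  simp only [pvGetA, List.getD_eq_getElem?_getD, List.getElem?_map]
  cases words[i]? <;> simp [pvKey]

lemma aLoop_spec (keyf : Nat → Char) : ∀ k i,
    (aLoop keyf k i true (keyf i) (keyf (i+1)) = true
      ↔ ∀ j, i ≤ j → j ≤ i + k → keyf j ≤ keyf (j+1)) ∧
    (aLoop keyf k i false (keyf (i+1)) (keyf i) = true
      ↔ ∀ j, i ≤ j → j ≤ i + k → keyf j ≤ keyf (j+1)) := by
  intro k
  induction k with
  | zero =>
      intro i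
      constructor <;>
      · simp only [aLoop, Bool.false_eq_true, if_false, if_true]
        split
        · next h =>
            constructor
            · intro hc; exact absurd hc (by simp)
            · intro hp; exact absurd (hp i le_rfl (by omega)) (not_le.mpr h)
        · next h =>
            constructor
            · intro _ j hj1 hj2
              have : j = i := by omega
              subst this; exact le_of_not_gt h
            · intro _; rfl
  | succ k ih =>
      intro i
      have e : i + 1 + 1 = i + 2 := by omega
      have key : (∀ j, i ≤ j → j ≤ i + (k+1) → keyf j ≤ keyf (j+1))
          ↔ (keyf i ≤ keyf (i+1) ∧ ∀ j, i+1 ≤ j → j ≤ (i+1) + k → keyf j ≤ keyf (j+1)) := by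
        constructor
        · intro h; exact ⟨h i le_rfl (by omega), fun j h1 h2 => h j (by omega) (by omega)⟩
        · rintro ⟨h1, h2⟩ j hj1 hj2
          rcases Nat.eq_or_lt_of_le hj1 with rfl | hlt
          · exact h1
          · exact h2 j hlt (by omega)
      constructor
      · simp only [aLoop, Bool.false_eq_true, if_false, if_true]
        split
        · next h =>
            constructor
            · intro hc; exact absurd hc (by simp)
            · intro hp; exact absurd (hp i le_rfl (by omega)) (not_le.mpr h)
        · next h =>
            rw [← e, (ih (i+1)).2, key]
            exact (and_iff_right (le_of_not_gt h)).symm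
      · simp only [aLoop, Bool.false_eq_true, if_false, if_true]
        split
        · next h =>
            constructor
            · intro hc; exact absurd hc (by simp)
            · intro hp; exact absurd (hp i le_rfl (by omega)) (not_le.mpr h)
        · next h =>
            rw [← e, (ih (i+1)).1, key]
            exact (and_iff_right (le_of_not_gt h)).symm

lemma beq_sorted_iff_pairwise (keys : List Char) :
    (keys == PySem.List.sorted keys (fun c => c) false) = true
      ↔ List.Pairwise (· ≤ ·) keys := by
  rw [beq_iff_eq]
  constructor
  · intro heq
    have hp := PySem.List.sorted_pairwise keys (fun c => c) (κ := Char)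
    rw [← heq] at hp
    exact hp
  · intro hp
    exact (PySem.List.sorted_eq_self_of_pairwise keys (fun c => c) hp).symm

lemma pairwise_iff_adjacent (keys : List Char) :
    List.Pairwise (· ≤ ·) keys
      ↔ ∀ j, (h : j + 1 < keys.length) → keys[j] ≤ keys[j+1] := by
  rw [← List.isChain_iff_pairwise, List.isChain_iff_getElem]

-- ===== VERDICT (by name: the statement is the Claim_ definition above) =====
theorem is_list_sorted_by_position_spec : Claim_equal_is_list_sorted_by_position := by
  intro words position _ _
  unfold Spec_is_list_sorted_by_position
  unfold is_list_sorted_by_position is_list_sorted_by_position_alt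
  by_cases hlen : words.length ≤ 1
  · simp [hlen]
  · simp only [hlen, if_false]
    set keys := words.map (pvKey position) with hkeys
    have hk : ∀ i, pvGetA words position i = keys.getD i ' ' :=
      fun i => pvGetA_eq_getD words position i
    have hlenk : keys.length = words.length := by simp [hkeys]
    have hfun : pvGetA words position = fun i => keys.getD i ' ' := funext hk
    rw [hfun]
    apply Bool.coe_iff_coe.mp
    rw [(aLoop_spec (fun i => keys.getD i ' ') (words.length - 2) 0).1,
        beq_sorted_iff_pairwise, pairwise_iff_adjacent]
    constructor
    · intro h j hj
      have := h j (Nat.zero_le j) (by omega)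
      rwa [List.getD_eq_getElem _ _ (by omega), List.getD_eq_getElem _ _ (by omega)] at this
    · intro h j hj1 hj2
      have hjlt : j + 1 < keys.length := by omega
      have := h j hjlt
      rwa [List.getD_eq_getElem _ _ (by omega), List.getD_eq_getElem _ _ (by omega)]
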